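-- pv_equiv track=rewrite | github.com/MycroftAI/skill-weather | source/weather.py | _determine_wind_direction
-- ===== SOURCE A (Python) =====
-- WIND_DIRECTION_CONVERSION = (
--     (22.5, "north"),
--     (67.5, "northeast"),
--     (112.5, "east"),
--     (157.5, "southeast"),
--     (202.5, "south"),
--     (247.5, "southwest"),
--     (292.5, "west"),
--     (337.5, "northwest"),
-- )
--
-- def _determine_wind_direction(degree_direction: int):
--     """Convert wind direction from compass degrees to compass direction.
--
--     :param degree_direction: Degrees on a compass indicating wind direction.
--     """
--     wind_direction = None
--     for min_degree, compass_direction in WIND_DIRECTION_CONVERSION: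
--         if degree_direction < min_degree:
--             wind_direction = compass_direction
--             break
--     if wind_direction is None:
--         wind_direction = "north"
--
--     return wind_direction
-- ===== SOURCE B (Python) =====
-- _BREAKPOINTS = (22.5, 67.5, 112.5, 157.5, 202.5, 247.5, 292.5, 337.5)
-- _DIRECTIONS = ("north", "northeast", "east", "southeast", "south",
--                "southwest", "west", "northwest", "north")
--
--
-- def _determine_wind_direction(degree_direction: int):
--     """Convert wind direction from compass degrees to compass direction."""
--     lo, hi = 0, 8
--     while lo < hi:
--         mid = (lo + hi) // 2
--         if degree_direction < _BREAKPOINTS[mid]: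
--             hi = mid
--         else:
--             lo = mid + 1
--     return _DIRECTIONS[lo]
-- ===== Notes on version B (the rewrite author's own statement) =====
-- stated objective: alternative
-- what changed: Replaces the linear scan with break over the threshold table by a binary search (bisect_right by hand) over the sorted breakpoints, indexing into a direction table whose extra last entry wraps to north.
import Mathlib
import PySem

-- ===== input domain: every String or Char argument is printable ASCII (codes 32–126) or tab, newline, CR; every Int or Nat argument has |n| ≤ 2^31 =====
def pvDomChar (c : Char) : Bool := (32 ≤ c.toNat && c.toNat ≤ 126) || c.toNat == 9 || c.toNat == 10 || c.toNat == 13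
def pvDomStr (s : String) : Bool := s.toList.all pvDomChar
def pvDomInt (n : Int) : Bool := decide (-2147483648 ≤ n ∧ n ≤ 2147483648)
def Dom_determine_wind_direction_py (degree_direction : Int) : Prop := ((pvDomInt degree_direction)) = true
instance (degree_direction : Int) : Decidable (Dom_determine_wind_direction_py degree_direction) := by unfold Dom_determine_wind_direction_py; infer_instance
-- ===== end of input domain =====

-- Alternative implementation: binary search over the sorted breakpoints instead of a linear scan.
-- Int degrees vs float thresholds k+0.5: 'd < k+0.5' is exact as '2*d < 2k+1' (comments mark both ports).
-- ===== PORT A =====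
-- thresholds doubled: d < 22.5 ⟺ 2*d < 45 (exact for integer d)
def pvWindTable : List (Int × String) :=
  [(45, "north"), (135, "northeast"), (225, "east"), (315, "southeast"),
   (405, "south"), (495, "southwest"), (585, "west"), (675, "northwest")]

-- the for-loop with break: first entry whose threshold exceeds the degree, else none
def pvWindLoop (degree_direction : Int) : List (Int × String) → Option String
  | [] => none
  | (min_degree, compass_direction) :: rest =>
      if 2 * degree_direction < min_degree then some compass_direction
      else pvWindLoop degree_direction rest

def determine_wind_direction_py (degree_direction : Int) : String :=
  (pvWindLoop degree_direction pvWindTable).getD "north"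

-- ===== PORT B =====
-- thresholds doubled as in port A (exact for integer input)
def pvBreakpoints : List Int := [45, 135, 225, 315, 405, 495, 585, 675]
def pvDirections : List String :=
  ["north", "northeast", "east", "southeast", "south", "southwest", "west", "northwest", "north"]

-- the while-loop of Source B: hand-written bisect_right on the breakpoints
def pvBisect (degree_direction : Int) (lo hi : Nat) : Nat :=
  if _h : lo < hi then
    let mid := (lo + hi) / 2
    if 2 * degree_direction < pvBreakpoints.getD mid 0 then pvBisect degree_direction lo mid
    else pvBisect degree_direction (mid + 1) hi
  else lo
termination_by hi - lo
decreasing_by all_goals omega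

def determine_wind_direction_py_alt (degree_direction : Int) : String :=
  pvDirections.getD (pvBisect degree_direction 0 8) "north"

-- ===== PRECONDITION & SPEC =====
def Spec_determine_wind_direction_py (degree_direction : Int) (out : String) : Prop := out = determine_wind_direction_py_alt degree_direction
instance (degree_direction : Int) (out : String) : Decidable (Spec_determine_wind_direction_py degree_direction out) := by unfold Spec_determine_wind_direction_py; infer_instance

-- ===== CLAIM (what is proved, stated in full; the proofs are below) =====
def Claim_equal_determine_wind_direction_py : Prop := ∀ (degree_direction : Int), Dom_determine_wind_direction_py degree_direction → Spec_determine_wind_direction_py degree_direction (determine_wind_direction_py degree_direction)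

-- ===== LEMMAS AND PROOFS =====

-- ===== VERDICT (by name: the statement is the Claim_ definition above) =====
-- evaluate the binary search on its concrete call tree (conditions are Nat literals, so each dite collapses)
lemma pvB08 (d : Int) : pvBisect d 0 8 =
    if 2 * d < 405 then
      (if 2 * d < 225 then
        (if 2 * d < 135 then (if 2 * d < 45 then 0 else 1) else 2)
       else (if 2 * d < 315 then 3 else 4))
    else
      (if 2 * d < 585 then (if 2 * d < 495 then 5 else 6)
       else (if 2 * d < 675 then 7 else 8)) := by
  simp [pvBisect.eq_def, pvBreakpoints]

theorem determine_wind_direction_py_spec : Claim_equal_determine_wind_direction_py := by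
  intro d _hdom
  unfold Spec_determine_wind_direction_py determine_wind_direction_py determine_wind_direction_py_alt
  rw [pvB08]
  simp only [pvWindTable, pvWindLoop, pvDirections]
  split_ifs <;> first | rfl | omega
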